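-- pv_equiv track=rewrite | github.com/pypi-data/pypi-mirror-61 | packages/your-win/your_win-0.1.5-py3-none-any.whl/your_win/your_win.py | PartListInList
-- ===== SOURCE A (Python) =====
-- def PartListInList(ListInList):
--     KeyValues, index, Max = {}, 0, 0
--     for l in ListInList:
--         if len(l) > Max:
--             Max = len(l)
--
--     for n in range(Max):
--         c = []
--         for l in ListInList:
--             try:
--                 c.append(l[n])
--             except:
--                 pass
--         if not index in KeyValues:
--             KeyValues[index] = []
--         KeyValues[index] += c
--         index += 1
--     return KeyValues
-- ===== SOURCE B (Python) =====
-- def PartListInList(ListInList):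
--     KeyValues = {}
--     for l in ListInList:
--         for n, v in enumerate(l):
--             KeyValues.setdefault(n, []).append(v)
--     return KeyValues
-- ===== Notes on version B (the rewrite author's own statement) =====
-- stated objective: alternative
-- what changed: Replaced A's column-major double scan (for each index n up to the max length, rescan every sublist and catch IndexError) by a single row-major pass that distributes each element into its per-index bucket with dict.setdefault.
import Mathlib
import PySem

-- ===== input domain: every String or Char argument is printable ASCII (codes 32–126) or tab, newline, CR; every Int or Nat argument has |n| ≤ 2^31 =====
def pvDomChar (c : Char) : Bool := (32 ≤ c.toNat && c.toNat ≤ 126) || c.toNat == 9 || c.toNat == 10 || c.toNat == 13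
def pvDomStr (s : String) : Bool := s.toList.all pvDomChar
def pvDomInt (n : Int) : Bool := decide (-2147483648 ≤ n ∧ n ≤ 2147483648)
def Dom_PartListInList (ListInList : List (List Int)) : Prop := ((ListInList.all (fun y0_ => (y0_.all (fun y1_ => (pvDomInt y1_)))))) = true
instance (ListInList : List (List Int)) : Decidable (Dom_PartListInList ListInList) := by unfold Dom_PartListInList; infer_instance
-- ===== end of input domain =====

-- B replaces A's column-major repeated scan (for each column index, rescan all sublists)
-- by a single row-major pass bucketing each element with dict.setdefault; objective: alternative.

-- ===== PORT A =====
-- body of A's outer `for n in range(Max)` loop: build column c, ensure key, extend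
def PartAStep (ListInList : List (List Int)) (st : PySem.Dict Int (List Int) × Int) (n : Int) :
    PySem.Dict Int (List Int) × Int :=
  let c : List Int := ListInList.foldl
    (fun c l => match PySem.List.pyGet? l n with
      | some v => c ++ [v]      -- try: c.append(l[n])
      | none => c) []           -- except: pass
  let kv := if st.1.contains st.2 then st.1 else st.1.insert st.2 []
  let kv := kv.insert st.2 (kv.getD st.2 [] ++ c)   -- KeyValues[index] += c (key just ensured)
  (kv, st.2 + 1)

def PartListInList (ListInList : List (List Int)) : List (Int × List Int) :=
  let Max : Int := ListInList.foldl (fun M l => if (l.length : Int) > M then (l.length : Int) else M) 0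
  ((PySem.List.pyRange 0 Max 1).foldl (PartAStep ListInList) (PySem.Dict.empty, 0)).1.items

-- ===== PORT B =====
-- KeyValues.setdefault(n, []).append(v)  ==  d[n] = d.get(n, []) + [v]
def PartBStep (kv : PySem.Dict Int (List Int)) (nv : Int × Int) : PySem.Dict Int (List Int) :=
  kv.modify nv.1 [] (fun b => b ++ [nv.2])

def PartBRow (kv : PySem.Dict Int (List Int)) (l : List Int) : PySem.Dict Int (List Int) :=
  (PySem.List.enumerate l 0).foldl PartBStep kv

def PartListInList_alt (ListInList : List (List Int)) : List (Int × List Int) :=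
  (ListInList.foldl PartBRow PySem.Dict.empty).items

-- ===== PRECONDITION & SPEC =====
def Spec_PartListInList (ListInList : List (List Int)) (out : List (Int × List Int)) : Prop := out = PartListInList_alt ListInList
instance (ListInList : List (List Int)) (out : List (Int × List Int)) : Decidable (Spec_PartListInList ListInList out) := by unfold Spec_PartListInList; infer_instance

-- ===== CLAIM (what is proved, stated in full; the proofs are below) =====
def Claim_equal_PartListInList : Prop := ∀ (ListInList : List (List Int)), Dom_PartListInList ListInList → Spec_PartListInList ListInList (PartListInList ListInList)

-- ===== LEMMAS AND PROOFS =====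

-- a dict whose items are (0, f 0) … (K-1, f (K-1))
def pvMk (K : Nat) (f : Nat → List Int) : PySem.Dict Int (List Int) :=
  ⟨(List.range K).map (fun (n : Nat) => ((n : Int), f n))⟩

theorem pvMk_congr (K : Nat) (f g : Nat → List Int) (h : ∀ n, n < K → f n = g n) :
    pvMk K f = pvMk K g := by
  apply PySem.Dict.ext
  simp only [pvMk]
  exact List.map_congr_left (fun n hn => by rw [h n (List.mem_range.mp hn)])

theorem pvMk_contains (K s : Nat) (f : Nat → List Int) :
    (pvMk K f).contains ((s : Nat) : Int) = decide (s < K) := by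
  by_cases h : s < K
  · simp only [h, decide_true]
    simp only [pvMk, PySem.Dict.contains, List.any_map, List.any_eq_true, List.mem_range,
      Function.comp_def]
    exact ⟨s, h, by simp⟩
  · simp only [h, decide_false]
    simp only [pvMk, PySem.Dict.contains, List.any_map, List.any_eq_false, List.mem_range,
      Function.comp_def, beq_iff_eq, Int.natCast_inj]
    omega

theorem pvFind_range (K s : Nat) (h : s < K) :
    (List.range K).find? (fun n => (((n : Nat) : Int) == ((s : Nat) : Int))) = some s := by
  induction K with
  | zero => omega
  | succ K ih =>
    rw [List.range_succ, List.find?_append]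
    by_cases hs : s < K
    · rw [ih hs]; rfl
    · have hsK : s = K := by omega
      subst hsK
      have hnone : (List.range s).find? (fun n => (((n : Nat) : Int) == ((s : Nat) : Int))) = none := by
        rw [List.find?_eq_none]
        intro n hn
        simp only [List.mem_range] at hn
        simp only [beq_iff_eq, Int.natCast_inj]
        omega
      rw [hnone]
      simp

theorem pvMk_getD (K s : Nat) (f : Nat → List Int) (h : s < K) :
    (pvMk K f).getD ((s : Nat) : Int) [] = f s := by
  simp only [pvMk, PySem.Dict.getD, PySem.Dict.get?, List.find?_map, Function.comp_def]
  rw [pvFind_range K s h]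
  rfl


theorem pvMk_getD_ge (K s : Nat) (f : Nat → List Int) (h : K ≤ s) :
    (pvMk K f).getD ((s : Nat) : Int) [] = [] := by
  simp only [pvMk, PySem.Dict.getD, PySem.Dict.get?, List.find?_map, Function.comp_def]
  have hnone : (List.range K).find? (fun n => (((n : Nat) : Int) == ((s : Nat) : Int))) = none := by
    rw [List.find?_eq_none]
    intro n hn
    simp only [List.mem_range] at hn
    simp only [beq_iff_eq, Int.natCast_inj]
    omega
  rw [hnone]
  rfl

theorem pvMk_insert_lt (K s : Nat) (f : Nat → List Int) (v : List Int) (h : s < K) :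
    (pvMk K f).insert ((s : Nat) : Int) v = pvMk K (fun n => if n = s then v else f n) := by
  have hc : (pvMk K f).contains ((s : Nat) : Int) = true := by
    rw [pvMk_contains]; simpa
  apply PySem.Dict.ext
  simp only [PySem.Dict.insert, hc, if_true]
  simp only [pvMk, List.map_map]
  apply List.map_congr_left
  intro n hn
  simp only [Function.comp_def]
  by_cases hns : n = s
  · subst hns; simp
  · have : (((n : Nat) : Int) == ((s : Nat) : Int)) = false := by
      simp only [beq_eq_false_iff_ne, ne_eq, Int.natCast_inj]; omega
    simp [this, hns]

theorem pvMk_insert_eq (s : Nat) (f : Nat → List Int) (v : List Int) :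
    (pvMk s f).insert ((s : Nat) : Int) v = pvMk (s + 1) (fun n => if n = s then v else f n) := by
  have hc : (pvMk s f).contains ((s : Nat) : Int) = false := by
    rw [pvMk_contains]; simp
  apply PySem.Dict.ext
  simp only [PySem.Dict.insert, hc]
  simp only [Bool.false_eq_true, if_false]
  simp only [pvMk, List.range_succ, List.map_append, List.map_cons, List.map_nil]
  simp only [↓reduceIte]
  congr 1
  apply List.map_congr_left
  intro n hn
  simp only [List.mem_range] at hn
  rw [if_neg (by omega)]


-- column n of L (the values that survive A's try/except, in row order)
def pvCol (L : List (List Int)) (n : Nat) : List Int := L.filterMap (fun l => l[n]?)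

-- length of the longest row
def pvMaxLen (L : List (List Int)) : Nat := L.foldl (fun M l => max M l.length) 0

-- the common result dict: key n ↦ column n, for n < pvMaxLen L, keys increasing
def pvCanon (L : List (List Int)) : PySem.Dict Int (List Int) := pvMk (pvMaxLen L) (pvCol L)

theorem pvMax_eq_aux (L : List (List Int)) : ∀ (M : Nat),
    L.foldl (fun M l => if (l.length : Int) > M then (l.length : Int) else M) ((M : Nat) : Int)
      = ((L.foldl (fun M l => max M l.length) M : Nat) : Int) := by
  induction L with
  | nil => intro M; rfl
  | cons x t ih =>
    intro M
    simp only [List.foldl_cons]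
    have hstep : (if ((x.length : Int) > ((M : Nat) : Int)) then (x.length : Int) else ((M : Nat) : Int))
        = ((max M x.length : Nat) : Int) := by
      split_ifs with h
      · have hlt : M < x.length := by exact_mod_cast h
        rw [Nat.max_eq_right (le_of_lt hlt)]
      · have hle : x.length ≤ M := by
          have : ¬ (M < x.length) := fun hc => h (by exact_mod_cast hc)
          omega
        rw [Nat.max_eq_left hle]
    rw [hstep, ih]

-- A's Max computation equals pvMaxLen
theorem pvMax_eq (L : List (List Int)) :
    L.foldl (fun M l => if (l.length : Int) > M then (l.length : Int) else M) 0 = (pvMaxLen L : Int) := by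
  have := pvMax_eq_aux L 0
  simpa [pvMaxLen] using this

theorem pvFoldMax_init_le (L : List (List Int)) : ∀ (M : Nat),
    M ≤ L.foldl (fun M l => max M l.length) M := by
  induction L with
  | nil => intro M; exact le_rfl
  | cons x t ih =>
    intro M
    simp only [List.foldl_cons]
    exact le_trans (Nat.le_max_left _ _) (ih _)

theorem pvFoldMax_mono (L : List (List Int)) : ∀ (M M' : Nat), M ≤ M' →
    L.foldl (fun M l => max M l.length) M ≤ L.foldl (fun M l => max M l.length) M' := by
  induction L with
  | nil => intro M M' h; exact h
  | cons x t ih =>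
    intro M M' h
    simp only [List.foldl_cons]
    exact ih _ _ (max_le_max h le_rfl)

theorem pvRow_len_le (L : List (List Int)) (l : List Int) (h : l ∈ L) : l.length ≤ pvMaxLen L := by
  induction L with
  | nil => cases h
  | cons x t ih =>
    unfold pvMaxLen
    simp only [List.foldl_cons]
    rcases List.mem_cons.mp h with h1 | h1
    · subst h1
      exact le_trans (Nat.le_max_right 0 l.length) (pvFoldMax_init_le t _)
    · exact le_trans (ih h1) (pvFoldMax_mono t 0 _ (Nat.zero_le _))

theorem pvCol_eq_nil (L : List (List Int)) (n : Nat) (h : pvMaxLen L ≤ n) : pvCol L n = [] := by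
  unfold pvCol
  rw [List.filterMap_eq_nil_iff]
  intro l hl
  exact List.getElem?_eq_none (le_trans (pvRow_len_le L l hl) h)

-- A's inner c-loop builds the column
theorem pvCfold (L : List (List Int)) (n : Nat) (c0 : List Int) :
    L.foldl (fun c l => match PySem.List.pyGet? l (n : Int) with
      | some v => c ++ [v]
      | none => c) c0 = c0 ++ pvCol L n := by
  induction L generalizing c0 with
  | nil => simp [pvCol]
  | cons x t ih =>
    simp only [List.foldl_cons]
    rw [PySem.List.pyGet?_natCast]
    rw [ih]
    cases hx : x[n]? with
    | none => simp [pvCol, hx]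
    | some v => simp [pvCol, hx]

def pvCanonPart (L : List (List Int)) (k : Nat) : PySem.Dict Int (List Int) := pvMk k (pvCol L)

theorem pvAstep (L : List (List Int)) (k : Nat) :
    PartAStep L (pvCanonPart L k, (k : Int)) (k : Int) = (pvCanonPart L (k + 1), (k : Int) + 1) := by
  unfold PartAStep pvCanonPart
  have hc : (pvMk k (pvCol L)).contains ((k : Nat) : Int) = false := by
    rw [pvMk_contains]; simp
  rw [hc]
  simp only [Bool.false_eq_true, if_false]
  rw [pvMk_insert_eq, pvMk_getD (k + 1) k _ (by omega), if_pos rfl,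
      pvMk_insert_lt (k + 1) k _ _ (by omega), pvCfold L k []]
  refine Prod.ext ?_ rfl
  show pvMk (k + 1) _ = pvMk (k + 1) (pvCol L)
  apply pvMk_congr
  intro n hn
  by_cases hns : n = k
  · subst hns; simp
  · simp [hns]

-- A's outer loop invariant
theorem pvAloop (L : List (List Int)) (k : Nat) :
    (PySem.List.pyRange 0 (k : Int) 1).foldl (PartAStep L) (PySem.Dict.empty, 0)
      = (pvCanonPart L k, (k : Int)) := by
  induction k with
  | zero =>
    rw [Nat.cast_zero, PySem.List.pyRange_one_eq_nil le_rfl]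
    rfl
  | succ k ih =>
    rw [show (((k + 1 : Nat)) : Int) = (k : Int) + 1 by push_cast; ring]
    rw [PySem.List.pyRange_one_succ_right (Int.natCast_nonneg k)]
    rw [List.foldl_append, ih]
    simp only [List.foldl_cons, List.foldl_nil]
    exact pvAstep L k

-- B's row invariant: mid-state after consuming the first s elements of row l
def pvMid (P : List (List Int)) (l : List Int) (s : Nat) : PySem.Dict Int (List Int) :=
  pvMk (max (pvMaxLen P) s) (fun n => pvCol P n ++ ((l.take s)[n]?).toList)

theorem pvBstep (P : List (List Int)) (l : List Int) (s : Nat) (v : Int)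
    (hs : s < l.length) (hv : l[s]? = some v) :
    PartBStep (pvMid P l s) ((s : Int), v) = pvMid P l (s + 1) := by
  unfold PartBStep pvMid
  simp only [PySem.Dict.modify]
  by_cases hM : s < pvMaxLen P
  · rw [Nat.max_eq_left (le_of_lt hM), Nat.max_eq_left hM]
    have htk : (l.take s)[s]? = none :=
      List.getElem?_eq_none (by simp [List.length_take])
    rw [pvMk_getD _ s _ hM, pvMk_insert_lt _ s _ _ hM]
    apply pvMk_congr
    intro n hn
    by_cases hns : n = s
    · subst hns
      rw [htk]
      have htk1 : (l.take (n + 1))[n]? = l[n]? := List.getElem?_take_of_lt (by omega)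
      simp [htk1, hv]
    · have : (l.take s)[n]? = (l.take (s + 1))[n]? := by
        by_cases hlt : n < s
        · rw [List.getElem?_take_of_lt (by omega), List.getElem?_take_of_lt (by omega)]
        · rw [List.getElem?_eq_none (by simp [List.length_take]; omega),
              List.getElem?_eq_none (by simp [List.length_take]; omega)]
      simp [hns, this]
  · have hM' : pvMaxLen P ≤ s := by omega
    rw [Nat.max_eq_right hM', Nat.max_eq_right (by omega : pvMaxLen P ≤ s + 1)]
    rw [pvMk_getD_ge s s _ le_rfl, pvMk_insert_eq]
    apply pvMk_congr
    intro n hn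
    by_cases hns : n = s
    · subst hns
      have htk1 : (l.take (n + 1))[n]? = l[n]? := List.getElem?_take_of_lt (by omega)
      simp [pvCol_eq_nil P n hM', htk1, hv]
    · have : (l.take s)[n]? = (l.take (s + 1))[n]? := by
        by_cases hlt : n < s
        · rw [List.getElem?_take_of_lt (by omega), List.getElem?_take_of_lt (by omega)]
        · rw [List.getElem?_eq_none (by simp [List.length_take]; omega),
              List.getElem?_eq_none (by simp [List.length_take]; omega)]
      simp [hns, this]

theorem pvBrow (P : List (List Int)) (l : List Int) :
    ∀ (t : List Int) (s : Nat), l.drop s = t → s ≤ l.length →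
      (PySem.List.enumerate t (s : Int)).foldl PartBStep (pvMid P l s) = pvMid P l l.length := by
  intro t
  induction t with
  | nil =>
    intro s h1 h2
    have hs : s = l.length := by
      have := congrArg List.length h1
      simp only [List.length_drop, List.length_nil] at this
      omega
    rw [PySem.List.enumerate_nil, List.foldl_nil, hs]
  | cons v t ih =>
    intro s h1 h2
    have hs : s < l.length := by
      have := congrArg List.length h1
      simp only [List.length_drop, List.length_cons] at this
      omega
    have hv : l[s]? = some v := by
      have h0 : (l.drop s)[0]? = l[s + 0]? := List.getElem?_drop
      rw [h1] at h0
      simpa using h0.symm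
    rw [PySem.List.enumerate_cons, List.foldl_cons, pvBstep P l s v hs hv]
    have hd : l.drop (s + 1) = t := by
      have : l.drop (s + 1) = (l.drop s).drop 1 := by rw [List.drop_drop]
      rw [this, h1, List.drop_one, List.tail_cons]
    rw [show ((s : Int) + 1) = (((s + 1 : Nat)) : Int) by push_cast; ring]
    exact ih (s + 1) hd hs

theorem pvMid_zero (P : List (List Int)) (l : List Int) : pvMid P l 0 = pvCanon P := by
  unfold pvMid pvCanon
  rw [Nat.max_zero]
  apply pvMk_congr
  intro n hn
  simp

theorem pvMaxLen_append (P : List (List Int)) (l : List Int) :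
    pvMaxLen (P ++ [l]) = max (pvMaxLen P) l.length := by
  unfold pvMaxLen
  rw [List.foldl_append]
  rfl

theorem pvMid_full (P : List (List Int)) (l : List Int) : pvMid P l l.length = pvCanon (P ++ [l]) := by
  unfold pvMid pvCanon
  rw [pvMaxLen_append, List.take_length]
  apply pvMk_congr
  intro n hn
  unfold pvCol
  rw [List.filterMap_append]
  cases hx : l[n]? <;> simp [hx]

theorem pvBloop (L : List (List Int)) : L.foldl PartBRow PySem.Dict.empty = pvCanon L := by
  induction L using List.reverseRecOn with
  | nil => rfl
  | append_singleton P l ih =>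
    rw [List.foldl_append, List.foldl_cons, List.foldl_nil, ih]
    unfold PartBRow
    rw [← pvMid_zero P l, ← pvMid_full P l]
    have := pvBrow P l l 0 (by simp) (Nat.zero_le _)
    simpa using this

-- ===== VERDICT (by name: the statement is the Claim_ definition above) =====
theorem PartListInList_spec : Claim_equal_PartListInList := by
  intro L _
  show PartListInList L = PartListInList_alt L
  unfold PartListInList PartListInList_alt
  rw [pvBloop, pvMax_eq]
  show ((PySem.List.pyRange 0 ((pvMaxLen L : Nat) : Int) 1).foldl (PartAStep L) (PySem.Dict.empty, 0)).1.items = (pvCanon L).items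
  rw [pvAloop]
  rfl
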